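-- pv_equiv track=rewrite | github.com/Nicldave/ADG | deal_scorer.py | _score_buying_intent
-- ===== SOURCE A (Python) =====
-- def _score_buying_intent(analysis: dict) -> tuple[float, list[str]]:
--     signals = analysis.get("buying_signals", [])
--     notes = []
--     if not signals:
--         return 0, ["No buying signals identified"]
--     strength_map = {"strong": 7, "moderate": 4, "weak": 2}
--     total = sum(strength_map.get(s.get("strength", "weak"), 2) for s in signals)
--     score = min(20, total)
--     strong = [s for s in signals if s.get("strength") == "strong"]
--     moderate = [s for s in signals if s.get("strength") == "moderate"]
--     notes.append(f"{len(signals)} buying signal(s): {len(strong)} strong, {len(moderate)} moderate")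
--     return score, notes
-- ===== SOURCE B (Python) =====
-- def _score_buying_intent(analysis: dict) -> tuple[float, list[str]]:
--     signals = analysis.get("buying_signals", [])
--     if not signals:
--         return 0, ["No buying signals identified"]
--     total = strong = moderate = 0
--     for s in signals:
--         st = s.get("strength", "weak")
--         if st == "strong":
--             total += 7
--             strong += 1
--         elif st == "moderate":
--             total += 4
--             moderate += 1
--         else:
--             total += 2
--     return min(20, total), [f"{len(signals)} buying signal(s): {strong} strong, {moderate} moderate"]
-- ===== Notes on version B (the rewrite author's own statement) =====
-- stated objective: simpler
-- what changed: Replaces A's three separate scans (a sum over a strength map plus two filtered list comprehensions) with a single loop that accumulates total, strong-count and moderate-count in one pass, dropping the dict lookup table and the intermediate lists.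
import Mathlib
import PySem

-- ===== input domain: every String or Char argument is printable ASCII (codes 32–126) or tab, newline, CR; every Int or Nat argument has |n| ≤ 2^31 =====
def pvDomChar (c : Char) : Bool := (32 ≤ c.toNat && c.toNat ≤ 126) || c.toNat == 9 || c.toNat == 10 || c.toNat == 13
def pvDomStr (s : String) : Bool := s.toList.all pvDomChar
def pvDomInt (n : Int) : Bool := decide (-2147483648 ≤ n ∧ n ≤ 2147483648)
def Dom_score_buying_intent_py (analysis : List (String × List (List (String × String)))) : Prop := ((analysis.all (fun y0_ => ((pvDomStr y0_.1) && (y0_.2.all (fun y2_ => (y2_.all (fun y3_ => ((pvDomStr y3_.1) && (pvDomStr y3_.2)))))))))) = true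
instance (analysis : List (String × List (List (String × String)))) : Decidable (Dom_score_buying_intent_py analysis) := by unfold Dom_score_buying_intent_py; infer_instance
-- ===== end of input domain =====

-- ===== PORT A =====
-- B replaces A's three scans by one accumulating pass; return value only, no mutation.
-- assoc-list lookup with default = Python dict.get(k, dflt) (first match)
def pyGetD (d : List (String × String)) (k dflt : String) : String :=
  ((d.find? (fun p => p.1 == k)).map (·.2)).getD dflt

-- assoc-list lookup = Python dict.get(k) (first match, None if absent)
def pyGet? (d : List (String × String)) (k : String) : Option String :=
  (d.find? (fun p => p.1 == k)).map (·.2)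

-- strength_map.get(x, 2)
def strengthMapGet (x : String) : Int :=
  ((([("strong", (7:Int)), ("moderate", 4), ("weak", 2)].find? (fun p => p.1 == x)).map (·.2))).getD 2

def score_buying_intent_py (analysis : List (String × List (List (String × String)))) : Int × List String :=
  let signals := ((analysis.find? (fun p => p.1 == "buying_signals")).map (·.2)).getD []
  if signals = [] then (0, ["No buying signals identified"])
  else
    let total := signals.foldl (fun acc s => acc + strengthMapGet (pyGetD s "strength" "weak")) 0
    let score := min 20 total
    let strong := signals.filter (fun s => pyGet? s "strength" == some "strong")
    let moderate := signals.filter (fun s => pyGet? s "strength" == some "moderate")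
    (score, [PySem.Int.toStr (signals.length : Int) ++ " buying signal(s): " ++
             PySem.Int.toStr (strong.length : Int) ++ " strong, " ++
             PySem.Int.toStr (moderate.length : Int) ++ " moderate"])

-- ===== PORT B =====
-- one step of B's single loop: accumulate (total, strong, moderate)
def sbiStep (acc : Int × Int × Int) (s : List (String × String)) : Int × Int × Int :=
  let st := pyGetD s "strength" "weak"
  if st = "strong" then (acc.1 + 7, acc.2.1 + 1, acc.2.2)
  else if st = "moderate" then (acc.1 + 4, acc.2.1, acc.2.2 + 1)
  else (acc.1 + 2, acc.2.1, acc.2.2)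

def score_buying_intent_py_alt (analysis : List (String × List (List (String × String)))) : Int × List String :=
  let signals := ((analysis.find? (fun p => p.1 == "buying_signals")).map (·.2)).getD []
  if signals = [] then (0, ["No buying signals identified"])
  else
    let acc := signals.foldl sbiStep (0, 0, 0)
    (min 20 acc.1, [PySem.Int.toStr (signals.length : Int) ++ " buying signal(s): " ++
                    PySem.Int.toStr acc.2.1 ++ " strong, " ++
                    PySem.Int.toStr acc.2.2 ++ " moderate"])

-- ===== PRECONDITION & SPEC =====
def Spec_score_buying_intent_py (analysis : List (String × List (List (String × String)))) (out : Int × List String) : Prop := out = score_buying_intent_py_alt analysis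
instance (analysis : List (String × List (List (String × String)))) (out : Int × List String) : Decidable (Spec_score_buying_intent_py analysis out) := by unfold Spec_score_buying_intent_py; infer_instance

-- ===== CLAIM (what is proved, stated in full; the proofs are below) =====
def Claim_equal_score_buying_intent_py : Prop := ∀ (analysis : List (String × List (List (String × String)))), Dom_score_buying_intent_py analysis → Spec_score_buying_intent_py analysis (score_buying_intent_py analysis)

-- ===== LEMMAS AND PROOFS =====
theorem sbi_weight_strong (s : List (String × String)) (h : pyGetD s "strength" "weak" = "strong") :
    strengthMapGet (pyGetD s "strength" "weak") = 7 := by rw [h]; decide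

theorem sbi_weight_moderate (s : List (String × String)) (h : pyGetD s "strength" "weak" = "moderate") :
    strengthMapGet (pyGetD s "strength" "weak") = 4 := by rw [h]; decide

theorem sbi_weight_other (s : List (String × String)) (h1 : pyGetD s "strength" "weak" ≠ "strong")
    (h2 : pyGetD s "strength" "weak" ≠ "moderate") :
    strengthMapGet (pyGetD s "strength" "weak") = 2 := by
  unfold strengthMapGet
  simp only [List.find?]
  rw [show (("strong", (7:Int)).1 == pyGetD s "strength" "weak") = false by
        simpa using fun h => h1 h.symm,
      show (("moderate", (4:Int)).1 == pyGetD s "strength" "weak") = false by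
        simpa using fun h => h2 h.symm]
  split <;> simp_all
  cases hw : ("weak" == pyGetD s "strength" "weak") <;> simp [hw]

theorem sbi_getD_eq_iff (s : List (String × String)) (v : String) (hv : v ≠ "weak") :
    pyGetD s "strength" "weak" = v ↔ pyGet? s "strength" = some v := by
  unfold pyGetD pyGet?
  cases h : (s.find? (fun p => p.1 == "strength")).map (·.2) <;> simp [h]
  intro he; exact absurd he.symm hv

theorem sbi_fold (sig : List (List (String × String))) (t a m : Int) :
    sig.foldl sbiStep (t, a, m) =
      (sig.foldl (fun acc s => acc + strengthMapGet (pyGetD s "strength" "weak")) t,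
       a + ((sig.filter (fun s => pyGet? s "strength" == some "strong")).length : Int),
       m + ((sig.filter (fun s => pyGet? s "strength" == some "moderate")).length : Int)) := by
  induction sig generalizing t a m with
  | nil => simp
  | cons hd tl ih =>
    simp only [List.foldl_cons, List.filter_cons]
    by_cases hs : pyGetD hd "strength" "weak" = "strong"
    · have hg : pyGet? hd "strength" = some "strong" := (sbi_getD_eq_iff hd _ (by decide)).1 hs
      have hg' : pyGet? hd "strength" ≠ some "moderate" := by rw [hg]; decide
      rw [show sbiStep (t, a, m) hd = (t + 7, a + 1, m) by simp [sbiStep, hs], ih,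
          sbi_weight_strong hd hs]
      simp [hg]
      ring
    · by_cases hm : pyGetD hd "strength" "weak" = "moderate"
      · have hg : pyGet? hd "strength" = some "moderate" := (sbi_getD_eq_iff hd _ (by decide)).1 hm
        have hg' : pyGet? hd "strength" ≠ some "strong" := by rw [hg]; decide
        rw [show sbiStep (t, a, m) hd = (t + 4, a, m + 1) by simp [sbiStep, hm], ih,
            sbi_weight_moderate hd hm]
        simp [hg]
        ring
      · have hg : pyGet? hd "strength" ≠ some "strong" := fun h =>
          hs ((sbi_getD_eq_iff hd _ (by decide)).2 h)
        have hg' : pyGet? hd "strength" ≠ some "moderate" := fun h =>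
          hm ((sbi_getD_eq_iff hd _ (by decide)).2 h)
        rw [show sbiStep (t, a, m) hd = (t + 2, a, m) by simp [sbiStep, hs, hm], ih,
            sbi_weight_other hd hs hm]
        simp [hg, hg']

-- ===== VERDICT (by name: the statement is the Claim_ definition above) =====
theorem score_buying_intent_py_spec : Claim_equal_score_buying_intent_py := by
  intro analysis _
  unfold Spec_score_buying_intent_py score_buying_intent_py score_buying_intent_py_alt
  set signals := ((analysis.find? (fun p => p.1 == "buying_signals")).map (·.2)).getD [] with hsig
  by_cases h : signals = []
  · simp [h]
  · simp only [if_neg h, sbi_fold, zero_add]
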